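-- pv_equiv track=rewrite | github.com/manuelgomezsuarez/AII-Eclipse | AII-Ejercicios/Ejercicios03-10-2017/ejercicio1.py | Ejercicio1c
-- ===== SOURCE A (Python) =====
-- def Ejercicio1c(fraseConNumeros):
--     """Reemplace todos los dígitos en la cadena por el caracter 'X'. Ej: ’su clave es: 1540’ y
--         ’X’ debería devolver ’su clave es: XXXX’"""
--     res=""
--     for n in range(len(fraseConNumeros)):
--         try:
--             int(fraseConNumeros[n])
--             res+="X"
--         except:
--             res+=fraseConNumeros[n]
--     print (res)
--     return res
-- ===== SOURCE B (Python) =====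
-- import re
--
-- def Ejercicio1c(fraseConNumeros):
--     res = re.sub(r'\d', 'X', fraseConNumeros)
--     print(res)
--     return res
-- ===== Notes on version B (the rewrite author's own statement) =====
-- stated objective: idiomatic
-- what changed: Replaced the per-character loop with try int()/except and string accumulation by a single regex substitution that replaces each decimal digit.
import Mathlib
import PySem

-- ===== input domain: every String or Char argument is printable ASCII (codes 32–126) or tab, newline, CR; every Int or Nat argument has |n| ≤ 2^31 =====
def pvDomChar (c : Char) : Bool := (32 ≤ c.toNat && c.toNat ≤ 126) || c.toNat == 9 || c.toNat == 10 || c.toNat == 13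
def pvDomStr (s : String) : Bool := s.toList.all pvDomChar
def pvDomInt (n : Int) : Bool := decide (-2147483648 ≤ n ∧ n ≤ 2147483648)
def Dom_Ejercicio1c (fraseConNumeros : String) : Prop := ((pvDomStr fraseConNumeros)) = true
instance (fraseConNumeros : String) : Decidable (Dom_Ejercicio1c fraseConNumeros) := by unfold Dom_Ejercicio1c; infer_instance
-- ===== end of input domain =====

-- B replaces A's per-character try/except loop with one regex substitution (idiomatic;
-- both print the result, so side effects match; equivalence is about the return value).
-- ===== PORT A =====
-- try: int(s[n]); res += "X"  /  except: res += s[n]  — int of a 1-char string via PySem.Int.ofChars?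
def Ejercicio1c (fraseConNumeros : String) : String :=
  (PySem.List.pyRange 0 (PySem.Str.len fraseConNumeros) 1).foldl
    (fun res n =>
      if (PySem.Int.ofChars? [PySem.List.pyGetD fraseConNumeros.toList n ' ']).isSome
      then res ++ "X" else res ++ String.ofList [PySem.List.pyGetD fraseConNumeros.toList n ' '])
    ""

-- ===== PORT B =====
-- re.sub(r'\d', 'X', s): on the ASCII domain \d matches exactly '0'..'9', so the
-- substitution is a character map (exact on Dom_Ejercicio1c).
def Ejercicio1c_alt (fraseConNumeros : String) : String :=
  String.ofList (fraseConNumeros.toList.map (fun c => if c.isDigit then 'X' else c))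

-- ===== PRECONDITION & SPEC =====
def Spec_Ejercicio1c (fraseConNumeros : String) (out : String) : Prop := out = Ejercicio1c_alt fraseConNumeros
instance (fraseConNumeros : String) (out : String) : Decidable (Spec_Ejercicio1c fraseConNumeros out) := by unfold Spec_Ejercicio1c; infer_instance

-- ===== CLAIM (what is proved, stated in full; the proofs are below) =====
def Claim_equal_Ejercicio1c : Prop := ∀ (fraseConNumeros : String), Dom_Ejercicio1c fraseConNumeros → Spec_Ejercicio1c fraseConNumeros (Ejercicio1c fraseConNumeros)

-- ===== LEMMAS AND PROOFS =====

-- ===== VERDICT (by name: at the bottom) =====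


lemma ofList_cons (c : Char) (l : List Char) :
    String.ofList (c :: l) = String.ofList [c] ++ String.ofList l := by
  apply String.ext
  simp [String.toList_ofList, String.toList_append]

-- For every character of the domain, int() on its 1-char string succeeds iff it is '0'..'9'.
lemma ofChars_single_isDigit (c : Char) (h : pvDomChar c = true) :
    (PySem.Int.ofChars? [c]).isSome = c.isDigit := by
  have key : ∀ n : Fin 128, (PySem.Int.ofChars? [Char.ofNat n.val]).isSome = (Char.ofNat n.val).isDigit := by decide
  have hlt : c.toNat < 128 := by
    simp [pvDomChar] at h
    omega
  have := key ⟨c.toNat, hlt⟩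
  simpa [Char.ofNat_toNat] using this

lemma foldl_step (l : List Char) (acc : String) (h : l.all pvDomChar = true) :
    l.foldl
      (fun res c =>
        if (PySem.Int.ofChars? [c]).isSome then res ++ "X" else res ++ String.ofList [c])
      acc
    = acc ++ String.ofList (l.map (fun c => if c.isDigit then 'X' else c)) := by
  induction l generalizing acc with
  | nil =>
    apply String.ext
    simp
  | cons c cs ih =>
    simp only [List.all_cons, Bool.and_eq_true] at h
    simp only [List.foldl_cons, List.map_cons, ofChars_single_isDigit c h.1]
    by_cases hd : c.isDigit
    · rw [if_pos hd, if_pos hd, ih _ h.2, ofList_cons,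
          show String.ofList ['X'] = "X" from by decide, String.append_assoc]
    · rw [if_neg hd, if_neg hd, ih _ h.2]
      apply String.ext
      simp [String.toList_ofList, String.toList_append]

theorem Ejercicio1c_spec : Claim_equal_Ejercicio1c := by
  intro s hdom
  unfold Spec_Ejercicio1c Ejercicio1c Ejercicio1c_alt
  rw [show PySem.Str.len s = PySem.List.len s.toList from rfl,
      PySem.List.foldl_pyRange_zero_pyGetD s.toList ' '
        (fun res c => if (PySem.Int.ofChars? [c]).isSome then res ++ "X" else res ++ String.ofList [c]) ""]
  rw [foldl_step _ _ hdom]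
  apply String.ext
  simp [String.toList_ofList]
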